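-- pv_equiv track=rewrite | github.com/Christinimini1206/Programming | FEB.py | changeF
-- ===== SOURCE A (Python) =====
-- def changeF(string, binary):
--     binInd = 0
--     for i in range(len(string)):
--         if string[i] == 'F':
--             if binary[binInd] == '0':
--                 string[i] = 'B'
--             else:
--                 string[i] = 'E'
--             binInd += 1
--     return string
-- ===== SOURCE B (Python) =====
-- def changeF(string, binary):
--     # Back-to-front: count the 'F's first, then traverse the list in reverse,
--     # consuming the bits of `binary` from the last used one downwards; finally
--     # write the re-reversed result back into `string` in place.
--     j = string.count('F')
--     out = []
--     for ch in reversed(string):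
--         if ch == 'F':
--             j -= 1
--             out.append('B' if binary[j] == '0' else 'E')
--         else:
--             out.append(ch)
--     string[:] = out[::-1]
--     return string
-- ===== Notes on version B (the rewrite author's own statement) =====
-- stated objective: alternative
-- what changed: Replaces A's forward index loop carrying an incrementing bit counter with a back-to-front construction: count the 'F's first, traverse the list in reverse consuming binary's bits from the last used one downwards, and write the re-reversed output back in place.
import Mathlib
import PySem

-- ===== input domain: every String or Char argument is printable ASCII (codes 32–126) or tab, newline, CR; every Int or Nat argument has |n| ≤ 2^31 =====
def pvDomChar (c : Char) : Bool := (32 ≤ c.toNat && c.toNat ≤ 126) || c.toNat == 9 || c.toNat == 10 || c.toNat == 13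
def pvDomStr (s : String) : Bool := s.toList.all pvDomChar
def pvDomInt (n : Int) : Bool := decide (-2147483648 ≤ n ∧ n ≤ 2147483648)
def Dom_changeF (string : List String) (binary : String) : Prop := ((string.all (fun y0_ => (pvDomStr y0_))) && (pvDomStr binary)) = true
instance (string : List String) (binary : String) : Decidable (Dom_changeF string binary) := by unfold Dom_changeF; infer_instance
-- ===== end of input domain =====

-- B replaces A's forward index loop with a back-to-front construction (count the
-- 'F's, traverse in reverse consuming binary's bits from the last one downwards,
-- re-reverse); the equivalence proved here is about the RETURN value (both
-- Pythons also mutate `string` in place, identically).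

-- ===== PORT A =====
-- loop body of A: read string[i]; on 'F', write 'B'/'E' per binary[binInd] and bump binInd
def stepA (binary : String) (st : List String × Int) (i : Int) : List String × Int :=
  if PySem.List.pyGetD st.1 i "" = "F" then
    match PySem.Str.pyGet? binary st.2 with
    | some b => (PySem.List.pySetD st.1 i (if b = '0' then "B" else "E"), st.2 + 1)
    | none => st      -- Python raises IndexError here; excluded by Pre_changeF
  else st

-- index loop over range(len(string)) carrying (current list, binInd)
def changeF (string : List String) (binary : String) : List String :=
  ((PySem.List.pyRange 0 (string.length : Int) 1).foldl (stepA binary) (string, 0)).1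

-- ===== PORT B =====
-- loop body of B: on 'F', decrement j first, then append 'B'/'E' per binary[j]; else append ch
def stepB (binary : String) (st : Int × List String) (ch : String) : Int × List String :=
  if ch = "F" then
    let j := st.1 - 1
    match PySem.Str.pyGet? binary j with
    | some b => (j, st.2 ++ [if b = '0' then "B" else "E"])
    | none => st      -- Python raises IndexError here; excluded by Pre_changeF
  else (st.1, st.2 ++ [ch])

-- j = string.count('F'); for ch in reversed(string): …; return out[::-1]
def changeF_alt (string : List String) (binary : String) : List String :=
  let st := string.reverse.foldl (stepB binary) ((string.count "F" : Int), [])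
  (PySem.List.slice? st.2 none none (-1)).getD st.2

-- ===== PRECONDITION & SPEC =====
-- Pre_ excludes exactly the inputs where both Pythons raise IndexError: more 'F' entries than binary has characters.
def Pre_changeF (string : List String) (binary : String) : Prop :=
  string.count "F" ≤ binary.toList.length
instance (string : List String) (binary : String) : Decidable (Pre_changeF string binary) := by unfold Pre_changeF; infer_instance
def pvWitness_changeF : List String × String := (["F", "x", "F"], "01")
def Spec_changeF (string : List String) (binary : String) (out : List String) : Prop := out = changeF_alt string binary
instance (string : List String) (binary : String) (out : List String) : Decidable (Spec_changeF string binary out) := by unfold Spec_changeF; infer_instance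

-- ===== CLAIM (what is proved, stated in full; the proofs are below) =====
def Claim_equal_changeF : Prop := ∀ (string : List String) (binary : String), Dom_changeF string binary → Pre_changeF string binary → Spec_changeF string binary (changeF string binary)

-- ===== LEMMAS AND PROOFS =====

-- reference result: rewrite `todo` consuming `bits` left to right
def pvSpecRec (todo : List String) (bits : List Char) : List String :=
  match todo, bits with
  | [], _ => []
  | x :: rest, bits =>
    if x = "F" then
      match bits with
      | b :: bs => (if b = '0' then "B" else "E") :: pvSpecRec rest bs
      | [] => x :: pvSpecRec rest []   -- unreachable under Pre_
    else x :: pvSpecRec rest bits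

theorem A_go (binary : String) (todo : List String) :
    ∀ (done : List String) (c : Nat), c + todo.count "F" ≤ binary.toList.length →
    (PySem.List.pyRange (done.length : Int) ((done.length + todo.length : Nat) : Int) 1).foldl
      (stepA binary) (done ++ todo, (c : Int))
    = (done ++ pvSpecRec todo (binary.toList.drop c), ((c + todo.count "F" : Nat) : Int)) := by
  induction todo with
  | nil => intro done c h; simp [pvSpecRec, PySem.List.pyRange]
  | cons x rest ih =>
    intro done c h
    rw [PySem.List.pyRange_one_cons (by push_cast [List.length_cons]; omega)]
    rw [List.foldl_cons]
    have hcast : ((done.length : Int) + 1) = ((done.length + 1 : Nat) : Int) := by push_cast; ring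
    by_cases hx : x = "F"
    · have hcnt : (x :: rest).count "F" = rest.count "F" + 1 := by rw [hx]; simp
      have hc : c < binary.toList.length := by rw [hcnt] at h; omega
      have hdrop : binary.toList.drop c = binary.toList[c] :: binary.toList.drop (c+1) :=
        (List.getElem_cons_drop hc).symm
      set v := (if binary.toList[c] = '0' then "B" else "E") with hv
      have hstep : stepA binary (done ++ x :: rest, (c : Int)) (done.length : Int)
          = ((done ++ [v]) ++ rest, ((c+1 : Nat) : Int)) := by
        simp [stepA, hx, PySem.Str.pyGet?, PySem.List.pyGetD_natCast,
          List.getElem?_eq_getElem hc]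
        exact hv.symm
      rw [hstep]
      have := ih (done ++ [v]) (c+1) (by rw [hcnt] at h; omega)
      simp only [List.length_append, List.length_cons, List.length_nil] at this ⊢
      have harr : (done.length + 1 + rest.length) = (done.length + (rest.length + 1)) := by omega
      rw [harr] at this
      rw [hcast, this, hdrop]
      simp only [pvSpecRec, hx, if_pos, List.append_assoc, List.singleton_append, ← hv]
      refine Prod.ext rfl ?_
      have hcnt' : List.count "F" ("F" :: rest) = List.count "F" rest + 1 := by simp
      rw [hcnt']; push_cast; ring
    · have hcnt : (x :: rest).count "F" = rest.count "F" := by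
        simp [hx]
      have hstep : stepA binary (done ++ x :: rest, (c : Int)) (done.length : Int)
          = ((done ++ [x]) ++ rest, (c : Int)) := by
        simp [stepA, hx, PySem.List.pyGetD_natCast]
      rw [hstep]
      have := ih (done ++ [x]) c (by rw [hcnt] at h; omega)
      simp only [List.length_append, List.length_cons, List.length_nil] at this ⊢
      have harr : (done.length + 1 + rest.length) = (done.length + (rest.length + 1)) := by omega
      rw [harr] at this
      rw [hcast, this]
      simp [pvSpecRec, hx, hcnt]

-- B's reversed traversal as a foldr over the original list: processing the suffix
-- `suf` with incoming counter j + count F suf appends (pvSpecRec suf (drop j)).reverse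
theorem B_go (binary : String) (suf : List String) :
    ∀ (j : Nat) (acc : List String), j + suf.count "F" ≤ binary.toList.length →
    suf.foldr (fun x s => stepB binary s x) (((j + suf.count "F" : Nat) : Int), acc)
    = ((j : Int), acc ++ (pvSpecRec suf (binary.toList.drop j)).reverse) := by
  induction suf with
  | nil => intro j acc h; simp [pvSpecRec]
  | cons x rest ih =>
    intro j acc h
    rw [List.foldr_cons]
    by_cases hx : x = "F"
    · have hcnt : (x :: rest).count "F" = rest.count "F" + 1 := by rw [hx]; simp
      have hc : j < binary.toList.length := by rw [hcnt] at h; omega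
      have hdrop : binary.toList.drop j = binary.toList[j] :: binary.toList.drop (j+1) :=
        (List.getElem_cons_drop hc).symm
      set v := (if binary.toList[j] = '0' then "B" else "E") with hv
      have hinit : (((j + (x :: rest).count "F" : Nat) : Int))
          = (((j + 1) + rest.count "F" : Nat) : Int) := by rw [hcnt]; push_cast; ring
      rw [hinit, ih (j+1) acc (by rw [hcnt] at h; omega)]
      have hstep : stepB binary (((j+1 : Nat) : Int), acc ++ (pvSpecRec rest (binary.toList.drop (j+1))).reverse) x
          = ((j : Int), (acc ++ (pvSpecRec rest (binary.toList.drop (j+1))).reverse) ++ [v]) := by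
        have hj : ((j+1 : Nat) : Int) - 1 = ((j : Nat) : Int) := by push_cast; ring
        simp only [stepB, hx, if_pos, hj, PySem.Str.pyGet?]
        simp [PySem.List.pyGet?_natCast, List.getElem?_eq_getElem hc]
        exact hv.symm
      rw [hstep, hdrop]
      simp [pvSpecRec, hx, ← hv]
    · have hcnt : (x :: rest).count "F" = rest.count "F" := by simp [hx]
      rw [hcnt, ih j acc (by rw [hcnt] at h; omega)]
      simp [stepB, hx, pvSpecRec]

theorem changeF_eq_spec (string : List String) (binary : String)
    (h : Pre_changeF string binary) :
    changeF string binary = pvSpecRec string binary.toList := by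
  have := A_go binary string [] 0 (by simpa using h)
  simp only [List.length_nil, List.nil_append, Nat.cast_zero, Nat.zero_add, List.drop_zero] at this
  unfold changeF
  rw [this]

theorem changeF_alt_eq_spec (string : List String) (binary : String)
    (h : Pre_changeF string binary) :
    changeF_alt string binary = pvSpecRec string binary.toList := by
  have hgo := B_go binary string 0 [] (by simpa using h)
  unfold changeF_alt
  rw [List.foldl_reverse]
  have hinit : ((string.count "F" : Int)) = (((0 + string.count "F" : Nat)) : Int) := by
    push_cast; ring
  rw [hinit, hgo]
  simp [PySem.List.slice?_none_none_neg_one]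

-- ===== VERDICT (by name: the statement is the Claim_ definition above) =====
theorem changeF_spec : Claim_equal_changeF := by
  intro string binary _ hpre
  show changeF string binary = changeF_alt string binary
  rw [changeF_eq_spec string binary hpre, changeF_alt_eq_spec string binary hpre]
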